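-- pv_equiv track=rewrite | github.com/k3sero/Blog_Content | Criptografia/Codigos_Practicas/Mochilas/ex2.py | knapsackdecipher
-- ===== SOURCE A (Python) =====
-- def knapsackdecipher(ciphertext, knapsack):
--     """
--     Función que descifra un texto cifrado utilizando el cifrado por mochilas.
--
--     Parámetros:
--     - ciphertext (list[int]): Lista de números enteros que representan el texto cifrado.
--     - knapsack (list[int]): Mochila supercreciente utilizada para el cifrado.
--
--     Retorno:
--     - plaintext (str): El texto descifrado.
--     """
--
--     n = len(knapsack)  # Tamaño de los bloques.
--     plaintext_bits = []  # Almacenará todos los bits descifrados.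
--     plaintext = ""
--
--     for value in ciphertext:
--         # Reconstruir el bloque binario a partir del valor cifrado.
--         binary_representation = [0] * n  # Inicializar lista binaria de tamaño n.
--         for i in range(n - 1, -1, -1):  # Iterar desde el final de la mochila hacia el principio.
--             if knapsack[i] <= value:
--                 binary_representation[i] = 1
--                 value -= knapsack[i]
--
--         # Añadir los bits reconstruidos al texto descifrado.
--         plaintext_bits.extend(binary_representation)
--
--     # Agrupar los bits descifrados en bloques de 8 y convertirlos a caracteres ASCII.
--     for i in range(0, len(plaintext_bits), 8):
--         block = plaintext_bits[i:i+8]  # Tomar un bloque de 8 bits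
--         if len(block) < 8:  # Ignorar bloques incompletos
--             break
--         ascii_value = int(''.join(map(str, block)), 2)  # Convertir a número decimal
--         plaintext += chr(ascii_value)  # Convertir a carácter ASCII
--
--     return plaintext
-- ===== SOURCE B (Python) =====
-- def knapsackdecipher(ciphertext, knapsack):
--     # One streaming pass: greedy-subtract each block's bits (built by walking the
--     # knapsack back-to-front, no index arithmetic) and feed them straight into a
--     # running byte accumulator; a character is emitted each time 8 bits arrive,
--     # so no flat bit list and no slicing-into-blocks phase is ever built.
--     out = []
--     cur = 0
--     count = 0
--     for value in ciphertext:
--         rev_bits = []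
--         for k in reversed(knapsack):
--             if k <= value:
--                 rev_bits.append(1)
--                 value -= k
--             else:
--                 rev_bits.append(0)
--         for b in reversed(rev_bits):
--             cur = cur * 2 + b
--             count += 1
--             if count == 8:
--                 out.append(chr(cur))
--                 cur = 0
--                 count = 0
--     return ''.join(out)
-- ===== Notes on version B (the rewrite author's own statement) =====
-- stated objective: faster
-- what changed: A builds a flat list of all decoded bits (with index arithmetic into the knapsack) and a second pass regroups it into 8-bit slices parsed via string join; B is one streaming pass that walks the knapsack back-to-front and feeds each bit into a running byte accumulator, emitting a character whenever 8 bits have arrived, so neither the flat bit list nor the slicing/str-join phase exists.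
import Mathlib
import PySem

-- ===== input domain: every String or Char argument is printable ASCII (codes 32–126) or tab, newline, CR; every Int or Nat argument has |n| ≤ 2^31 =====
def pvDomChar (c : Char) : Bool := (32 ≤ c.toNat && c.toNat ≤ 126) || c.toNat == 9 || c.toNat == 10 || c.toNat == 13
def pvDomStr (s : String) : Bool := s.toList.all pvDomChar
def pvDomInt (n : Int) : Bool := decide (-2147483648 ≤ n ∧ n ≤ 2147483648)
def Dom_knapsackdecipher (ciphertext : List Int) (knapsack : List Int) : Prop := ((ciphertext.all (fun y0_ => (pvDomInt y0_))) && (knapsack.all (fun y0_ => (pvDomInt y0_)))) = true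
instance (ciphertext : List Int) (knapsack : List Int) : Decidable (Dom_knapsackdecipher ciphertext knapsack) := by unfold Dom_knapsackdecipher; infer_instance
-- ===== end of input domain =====

-- B fuses A's two phases (build flat bit list, then regroup in slices of 8) into one
-- streaming pass with a running byte accumulator; same return value, proved equal.


-- ===== PORT A =====
-- inner loop 'for i in range(n-1, -1, -1)' over one ciphertext value; state = (binary_representation, value)
def pvA_block (knapsack : List Int) (value : Int) : List Int × Int :=
  (PySem.List.pyRange ((knapsack.length : Int) - 1) (-1) (-1)).foldl
    (fun st i =>
      if PySem.List.pyGetD knapsack i 0 ≤ st.2 then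
        (PySem.List.pySetD st.1 i 1, st.2 - PySem.List.pyGetD knapsack i 0)
      else st)
    (List.replicate knapsack.length 0, value)

-- second loop 'for i in range(0, len(plaintext_bits), 8)' with its break; the Python
-- string accumulator is carried as its List Char (exact: a str is its code-point list).
-- int(''.join(map(str, block)), 2) is ported as the base-2 digit fold a*2+b — exact,
-- since the entries of block are literally the ints 0 and 1.
def pvA_loop2 : List Int → List Int → List Char → List Char
  | [], _, acc => acc
  | i :: rest, bits, acc =>
    let block := PySem.List.slice bits (some i) (some (i + 8))
    if block.length < 8 then acc   -- break
    else pvA_loop2 rest bits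
      (acc ++ [Char.ofNat (block.foldl (fun a b => a * 2 + b) 0).toNat])

def knapsackdecipher (ciphertext : List Int) (knapsack : List Int) : String :=
  let plaintext_bits := ciphertext.foldl (fun acc value => acc ++ (pvA_block knapsack value).1) []
  String.ofList (pvA_loop2 (PySem.List.pyRange 0 (plaintext_bits.length : Int) 8) plaintext_bits [])

-- ===== PORT B =====
-- 'for k in reversed(knapsack): append bit'; state = (rev_bits, value)
def pvB_revbits (knapsack_rev : List Int) (value : Int) : List Int × Int :=
  knapsack_rev.foldl
    (fun st k => if k ≤ st.2 then (st.1 ++ [1], st.2 - k) else (st.1 ++ [0], st.2))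
    ([], value)

-- 'for b in reversed(rev_bits): cur = cur*2 + b; count += 1; if count == 8: emit';
-- state = (out, cur, count); out is the char list joined at the end
def pvB_feed : List Int → List Char × Int × Nat → List Char × Int × Nat
  | [], st => st
  | b :: rest, (out, cur, count) =>
    let cur' := cur * 2 + b
    if count + 1 == 8 then pvB_feed rest (out ++ [Char.ofNat cur'.toNat], 0, 0)
    else pvB_feed rest (out, cur', count + 1)

-- outer 'for value in ciphertext'
def pvB_outer : List Int → List Int → List Char × Int × Nat → List Char × Int × Nat
  | [], _, st => st
  | value :: rest, knapsack, st =>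
    pvB_outer rest knapsack (pvB_feed (pvB_revbits knapsack.reverse value).1.reverse st)

def knapsackdecipher_alt (ciphertext : List Int) (knapsack : List Int) : String :=
  String.ofList (pvB_outer ciphertext knapsack ([], 0, 0)).1

-- ===== PRECONDITION & SPEC =====
def Spec_knapsackdecipher (ciphertext : List Int) (knapsack : List Int) (out : String) : Prop := out = knapsackdecipher_alt ciphertext knapsack
instance (ciphertext : List Int) (knapsack : List Int) (out : String) : Decidable (Spec_knapsackdecipher ciphertext knapsack out) := by unfold Spec_knapsackdecipher; infer_instance

-- ===== CLAIM (what is proved, stated in full; the proofs are below) =====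
def Claim_equal_knapsackdecipher : Prop := ∀ (ciphertext : List Int) (knapsack : List Int), Dom_knapsackdecipher ciphertext knapsack → Spec_knapsackdecipher ciphertext knapsack (knapsackdecipher ciphertext knapsack)

-- ===== LEMMAS AND PROOFS =====

-- reference greedy: the bits of one block in high-to-low (reversed-knapsack) order
def pvGreedy : List Int → Int → List Int × Int
  | [], v => ([], v)
  | k :: ks, v =>
    if k ≤ v then (1 :: (pvGreedy ks (v - k)).1, (pvGreedy ks (v - k)).2)
    else (0 :: (pvGreedy ks v).1, (pvGreedy ks v).2)

-- B's inner append-fold is the greedy recursion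
theorem pvB_revbits_fold (l : List Int) : ∀ (acc : List Int) (v : Int),
    l.foldl (fun st k => if k ≤ st.2 then (st.1 ++ [1], st.2 - k) else (st.1 ++ [0], st.2)) (acc, v)
      = (acc ++ (pvGreedy l v).1, (pvGreedy l v).2) := by
  induction l with
  | nil => intro acc v; simp [pvGreedy]
  | cons k ks ih =>
    intro acc v
    by_cases h : k ≤ v
    · simp only [List.foldl_cons, if_pos h, ih, pvGreedy]
      simp
    · simp only [List.foldl_cons, if_neg h, ih, pvGreedy]
      simp

theorem pvB_revbits_eq (l : List Int) (v : Int) : pvB_revbits l v = pvGreedy l v := by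
  simpa [pvB_revbits] using pvB_revbits_fold l [] v

-- A's descending index scan never touches the last slot once it has been set
theorem pvA_fold_low (I : List Int) : ∀ (ks : List Int) (k b : Int) (l : List Int) (v : Int),
    l.length = ks.length → (∀ i ∈ I, 0 ≤ i ∧ i < (ks.length : Int)) →
    I.foldl (fun st i =>
        if PySem.List.pyGetD (ks ++ [k]) i 0 ≤ st.2 then
          (PySem.List.pySetD st.1 i 1, st.2 - PySem.List.pyGetD (ks ++ [k]) i 0)
        else st) (l ++ [b], v)
      = ((I.foldl (fun st i =>
            if PySem.List.pyGetD ks i 0 ≤ st.2 then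
              (PySem.List.pySetD st.1 i 1, st.2 - PySem.List.pyGetD ks i 0)
            else st) (l, v)).1 ++ [b],
         (I.foldl (fun st i =>
            if PySem.List.pyGetD ks i 0 ≤ st.2 then
              (PySem.List.pySetD st.1 i 1, st.2 - PySem.List.pyGetD ks i 0)
            else st) (l, v)).2) := by
  induction I with
  | nil => intro ks k b l v _ _; simp
  | cons i I ih =>
    intro ks k b l v hlen hmem
    obtain ⟨hi0, hilt⟩ := hmem i (List.mem_cons_self ..)
    have hlt : i.toNat < ks.length := by omega
    have hget : PySem.List.pyGetD (ks ++ [k]) i 0 = PySem.List.pyGetD ks i 0 := by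
      rw [PySem.List.pyGetD_of_nonneg _ _ hi0, PySem.List.pyGetD_of_nonneg _ _ hi0,
        List.getD_append _ _ _ _ hlt]
    have hset : PySem.List.pySetD (l ++ [b]) i 1 = PySem.List.pySetD l i 1 ++ [b] := by
      rw [PySem.List.pySetD_of_nonneg _ _ hi0, PySem.List.pySetD_of_nonneg _ _ hi0,
        List.set_append, if_pos (by omega)]
    simp only [List.foldl_cons, hget]
    by_cases h : PySem.List.pyGetD ks i 0 ≤ v
    · simp only [if_pos h, hset]
      exact ih ks k b _ _ (by simp [hlen]) (fun j hj => hmem j (List.mem_cons_of_mem _ hj))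
    · simp only [if_neg h]
      exact ih ks k b _ _ hlen (fun j hj => hmem j (List.mem_cons_of_mem _ hj))

theorem pvA_block_eq (ks : List Int) : ∀ (v : Int),
    pvA_block ks v = ((pvGreedy ks.reverse v).1.reverse, (pvGreedy ks.reverse v).2) := by
  induction ks using List.reverseRecOn with
  | nil =>
    intro v
    simp [pvA_block, pvGreedy]
  | append_singleton ks k ih =>
    intro v
    have hm : ((ks ++ [k]).length : Int) - 1 = (ks.length : Int) := by simp
    have hcons : PySem.List.pyRange ((ks ++ [k]).length - 1 : Int) (-1) (-1)
        = (ks.length : Int) :: PySem.List.pyRange ((ks.length : Int) - 1) (-1) (-1) := by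
      rw [hm, PySem.List.pyRange_neg_one_cons (by omega)]
    have hgetk : PySem.List.pyGetD (ks ++ [k]) (ks.length : Int) 0 = k := by
      rw [PySem.List.pyGetD_of_nonneg _ _ (by positivity)]
      simp [List.getD]
    have hrepl : List.replicate (ks ++ [k]).length (0 : Int)
        = List.replicate ks.length 0 ++ [0] := by
      simp [List.replicate_succ' ]
    have hmem : ∀ i ∈ PySem.List.pyRange ((ks.length : Int) - 1) (-1) (-1),
        0 ≤ i ∧ i < (ks.length : Int) := by
      intro i hi
      rw [PySem.List.mem_pyRange_neg_one] at hi
      omega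
    have hset0 : PySem.List.pySetD (List.replicate ks.length (0:Int) ++ [0]) (ks.length : Int) 1
        = List.replicate ks.length 0 ++ [1] := by
      rw [PySem.List.pySetD_of_nonneg _ _ (by positivity)]
      simp
    have hrev : (ks ++ [k]).reverse = k :: ks.reverse := by simp
    unfold pvA_block
    rw [hcons, hrepl, List.foldl_cons, hgetk, hrev]
    by_cases h : k ≤ v
    · simp only [if_pos h, hset0]
      rw [pvA_fold_low _ ks k 1 _ _ (by simp) hmem]
      have hih := ih (v - k)
      unfold pvA_block at hih
      rw [hih]
      simp [pvGreedy, h]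
    · simp only [if_neg h]
      rw [pvA_fold_low _ ks k 0 _ _ (by simp) hmem]
      have hih := ih v
      unfold pvA_block at hih
      rw [hih]
      simp [pvGreedy, h]

-- the flat bit list both programs process, block by block
def pvBits (knapsack : List Int) (ciphertext : List Int) : List Int :=
  ciphertext.flatMap (fun v => (pvGreedy knapsack.reverse v).1.reverse)

theorem pvA_bits_eq (ks ct : List Int) :
    ct.foldl (fun acc value => acc ++ (pvA_block ks value).1) [] = pvBits ks ct := by
  rw [PySem.List.foldl_append_eq_flatMap]
  simp only [pvBits, List.nil_append]
  congr 1
  funext v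
  rw [pvA_block_eq]

theorem pvB_feed_append (xs : List Int) : ∀ (ys : List Int) (st : List Char × Int × Nat),
    pvB_feed (xs ++ ys) st = pvB_feed ys (pvB_feed xs st) := by
  induction xs with
  | nil => intro ys st; simp [pvB_feed]
  | cons b rest ih =>
    intro ys st
    obtain ⟨out, cur, count⟩ := st
    simp only [List.cons_append, pvB_feed]
    split <;> exact ih ..

theorem pvB_outer_eq (ct : List Int) : ∀ (ks : List Int) (st : List Char × Int × Nat),
    pvB_outer ct ks st = pvB_feed (pvBits ks ct) st := by
  induction ct with
  | nil => intro ks st; simp [pvB_outer, pvBits, pvB_feed]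
  | cons v rest ih =>
    intro ks st
    simp only [pvB_outer, pvBits, List.flatMap_cons, pvB_feed_append, pvB_revbits_eq]
    rw [ih]
    rfl

theorem pvB_feed_short (bs : List Int) : ∀ (acc : List Char) (cur : Int) (count : Nat),
    bs.length + count < 8 → (pvB_feed bs (acc, cur, count)).1 = acc := by
  induction bs with
  | nil => intro acc cur count _; rfl
  | cons b rest ih =>
    intro acc cur count h
    simp only [List.length_cons] at h
    have hne : (count + 1 == 8) = false := by simp; omega
    simp only [pvB_feed, hne, Bool.false_eq_true, if_false]
    exact ih _ _ _ (by omega)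

-- range(0, L, 8) induction forms (from PySem.List.pyRange_of_pos)
theorem pvRange8_nil (L : Int) (h : L ≤ 0) : PySem.List.pyRange 0 L 8 = [] := by
  rw [PySem.List.pyRange_of_pos _ _ (by norm_num)]
  rw [if_neg (by omega)]
  simp

theorem pvRange8_cons (L : Int) (h : 0 < L) :
    PySem.List.pyRange 0 L 8 = 0 :: (PySem.List.pyRange 0 (L - 8) 8).map (· + 8) := by
  rw [PySem.List.pyRange_of_pos _ _ (by norm_num : (0:Int) < 8),
      PySem.List.pyRange_of_pos _ _ (by norm_num : (0:Int) < 8)]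
  rw [if_pos h]
  by_cases h8 : 0 < L - 8
  · rw [if_pos h8]
    have hc : ((L - 0 + 8 - 1) / 8).toNat = ((L - 8 - 0 + 8 - 1) / 8).toNat + 1 := by omega
    rw [hc, List.range_succ_eq_map]
    simp only [List.map_cons, List.map_map]
    refine congrArg₂ (· :: ·) (by norm_num) ?_
    apply List.map_congr_left
    intro k _
    simp [Function.comp]
    ring
  · rw [if_neg h8]
    have hc : ((L - 0 + 8 - 1) / 8).toNat = 1 := by omega
    rw [hc]
    simp [List.range_succ]

theorem pvLoop2_map8 (idx : List Int) : ∀ (x8 rest : List Int) (acc : List Char),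
    x8.length = 8 → (∀ i ∈ idx, 0 ≤ i) →
    pvA_loop2 (idx.map (· + 8)) (x8 ++ rest) acc = pvA_loop2 idx rest acc := by
  induction idx with
  | nil => intro x8 rest acc _ _; rfl
  | cons i idx ih =>
    intro x8 rest acc hx8 hmem
    have hi0 : 0 ≤ i := hmem i (List.mem_cons_self ..)
    have hblock : PySem.List.slice (x8 ++ rest) (some (i + 8)) (some (i + 8 + 8))
        = PySem.List.slice rest (some i) (some (i + 8)) := by
      rw [PySem.List.slice_toNat _ (by omega) (by omega),
          PySem.List.slice_toNat _ (by omega) (by omega)]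
      have h1 : (i + 8).toNat = i.toNat + 8 := by omega
      have h2 : (i + 8 + 8).toNat = i.toNat + 8 + 8 := by omega
      rw [h1, h2, List.drop_append]
      rw [List.drop_of_length_le (by omega), hx8]
      simp
    simp only [List.map_cons, pvA_loop2, hblock]
    split
    · rfl
    · exact ih _ _ _ hx8 (fun j hj => hmem j (List.mem_cons_of_mem _ hj))

-- the core grouping equality: A's slice-by-8 loop equals B's streaming accumulator
theorem pvGroup (n : Nat) : ∀ (bits : List Int) (acc : List Char), bits.length = n →
    pvA_loop2 (PySem.List.pyRange 0 (bits.length : Int) 8) bits acc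
      = (pvB_feed bits (acc, 0, 0)).1 := by
  induction n using Nat.strong_induction_on with
  | _ n ih =>
    intro bits acc hlen
    by_cases h8 : 8 ≤ bits.length
    · -- peel one full byte
      obtain ⟨b0, t0, h0⟩ : ∃ b t, bits = b :: t := by
        cases bits with | nil => simp at h8 | cons b t => exact ⟨b, t, rfl⟩
      subst h0
      obtain ⟨b1, t1, h1⟩ : ∃ b t, t0 = b :: t := by
        cases t0 with | nil => simp at h8 | cons b t => exact ⟨b, t, rfl⟩
      subst h1
      obtain ⟨b2, t2, h2⟩ : ∃ b t, t1 = b :: t := by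
        cases t1 with | nil => simp at h8 | cons b t => exact ⟨b, t, rfl⟩
      subst h2
      obtain ⟨b3, t3, h3⟩ : ∃ b t, t2 = b :: t := by
        cases t2 with | nil => simp at h8 | cons b t => exact ⟨b, t, rfl⟩
      subst h3
      obtain ⟨b4, t4, h4⟩ : ∃ b t, t3 = b :: t := by
        cases t3 with | nil => simp at h8 | cons b t => exact ⟨b, t, rfl⟩
      subst h4
      obtain ⟨b5, t5, h5⟩ : ∃ b t, t4 = b :: t := by
        cases t4 with | nil => simp at h8 | cons b t => exact ⟨b, t, rfl⟩
      subst h5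
      obtain ⟨b6, t6, h6⟩ : ∃ b t, t5 = b :: t := by
        cases t5 with | nil => simp at h8 | cons b t => exact ⟨b, t, rfl⟩
      subst h6
      obtain ⟨b7, rest, h7⟩ : ∃ b t, t6 = b :: t := by
        cases t6 with | nil => simp at h8 | cons b t => exact ⟨b, t, rfl⟩
      subst h7
      set x8 : List Int := [b0, b1, b2, b3, b4, b5, b6, b7] with hx8def
      have hsplit : b0 :: b1 :: b2 :: b3 :: b4 :: b5 :: b6 :: b7 :: rest = x8 ++ rest := rfl
      have hLpos : (0:Int) < ((b0 :: b1 :: b2 :: b3 :: b4 :: b5 :: b6 :: b7 :: rest).length : Int) := by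
        simp
        omega
      -- A side
      rw [pvRange8_cons _ hLpos]
      have hslice : PySem.List.slice (x8 ++ rest) (some 0) (some (0 + 8)) = x8 := by
        rw [PySem.List.slice_toNat _ (by norm_num) (by norm_num)]
        simp [hx8def]
      rw [hsplit]
      simp only [pvA_loop2, hslice]
      rw [if_neg (by simp [hx8def])]
      have hA := pvLoop2_map8 (PySem.List.pyRange 0 ((x8 ++ rest).length - 8 : Int) 8) x8 rest
        (acc ++ [Char.ofNat (x8.foldl (fun a b => a * 2 + b) 0).toNat]) (by simp [hx8def])
        (fun i hi => ((PySem.List.mem_pyRange_iff_of_pos (by norm_num) i).1 hi).1)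
      rw [hA]
      have hlenrest : ((x8 ++ rest).length - 8 : Int) = (rest.length : Int) := by
        simp [hx8def]
        omega
      rw [hlenrest]
      have hArec := ih rest.length (by simp at hlen; omega) rest
        (acc ++ [Char.ofNat (x8.foldl (fun a b => a * 2 + b) 0).toNat]) rfl
      rw [hArec]
      -- B side
      rw [pvB_feed_append, hx8def]
      simp [pvB_feed]
    · -- fewer than 8 bits remain: A breaks (or the range is empty), B emits nothing
      rw [pvB_feed_short bits acc 0 0 (by omega)]
      by_cases h0 : bits.length = 0
      · rw [pvRange8_nil _ (by omega)]
        rfl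
      · rw [pvRange8_cons _ (by omega)]
        simp only [pvA_loop2]
        rw [if_pos]
        rw [PySem.List.slice_toNat _ (by norm_num) (by norm_num)]
        simp
        omega

-- ===== VERDICT (by name: the statement is the Claim_ definition above) =====
theorem knapsackdecipher_spec : Claim_equal_knapsackdecipher := by
  intro ct ks _
  unfold Spec_knapsackdecipher knapsackdecipher knapsackdecipher_alt
  simp only [pvA_bits_eq, pvB_outer_eq]
  rw [pvGroup (pvBits ks ct).length _ _ rfl]
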